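-- pv_equiv track=rewrite | github.com/FakeCola/pc_rule_grouping | bitcuts.py | bit_separation_info
-- ===== SOURCE A (Python) =====
-- FIELD_LENTH = [32, 32, 16, 16, 8]
--
-- def bit_separation_info(ruleset, bit):
--     # locate the dim and get the rule_mask
--     if 0 <= bit and bit < 32:
--         hash_bit = bit
--         dim = 0
--     elif 32 <= bit and bit < 64:
--         hash_bit = bit - 32
--         dim = 1
--     elif 64 <= bit and bit < 80:
--         hash_bit = bit - 64
--         dim = 2
--     elif 80 <= bit and bit < 96:
--         hash_bit = bit - 80
--         dim = 3
--     elif 96 <= bit and bit < 104: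
--         hash_bit = bit - 96
--         dim = 4
--     rule_mask = 1 << (FIELD_LENTH[dim]-1-hash_bit)
--     # get each rule's separa-state by the bit. 0:can't separa, 1:bit=0, 2:bit=1
--     rule_num = len(ruleset)
--     rule_state_array = [0] * rule_num
--     for i, rule in enumerate(ruleset):
--         if rule[dim][0] ^ rule[dim][1] >= rule_mask:
--             continue
--         elif rule[dim][0] & rule_mask == 0:
--             rule_state_array[i] = 1;
--         else:
--             rule_state_array[i] = 2;
--     # build the separa dict:
--     separated_pairs = list()
--     label = int(0)          #basic unit of the dictionary: int
--     cnt = 0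
--     for i in range(rule_num):
--         for j in range(i+1,rule_num):
--             if cnt > 29:    #30 bits used per int(which takes 12 Byte memory size)
--                 separated_pairs.append(label)
--                 cnt = 0
--                 label = 0
--             label = label << 1
--             if rule_state_array[i] + rule_state_array[j] == 3:
--                 label = label | 1
--             cnt = cnt + 1
--     separated_pairs.append(label)
--     return separated_pairs
-- ===== SOURCE B (Python) =====
-- FIELD_LENTH = [32, 32, 16, 16, 8]
--
-- def bit_separation_info(ruleset, bit):
--     # same dim/hash_bit guard chain as the original (out-of-range bit raises the same way)
--     if 0 <= bit and bit < 32: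
--         hash_bit = bit
--         dim = 0
--     elif 32 <= bit and bit < 64:
--         hash_bit = bit - 32
--         dim = 1
--     elif 64 <= bit and bit < 80:
--         hash_bit = bit - 64
--         dim = 2
--     elif 80 <= bit and bit < 96:
--         hash_bit = bit - 80
--         dim = 3
--     elif 96 <= bit and bit < 104:
--         hash_bit = bit - 96
--         dim = 4
--     rule_mask = 1 << (FIELD_LENTH[dim] - 1 - hash_bit)
--     # one pass: per-rule state plus two packed bitmasks of the whole state list
--     # (m1 has a 1-bit where state==1, m2 where state==2; MSB = first rule)
--     n = len(ruleset)
--     states = []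
--     m1 = 0
--     m2 = 0
--     for rule in ruleset:
--         lo, hi = rule[dim]
--         if lo ^ hi >= rule_mask:
--             s = 0
--         elif lo & rule_mask == 0:
--             s = 1
--         else:
--             s = 2
--         states.append(s)
--         m1 = (m1 << 1) | (1 if s == 1 else 0)
--         m2 = (m2 << 1) | (1 if s == 2 else 0)
--     # row i (all pairs (i,j), j>i) is a single mask-and-truncate of a big integer:
--     # a pair separates iff one state is 1 and the other 2, so row i is the low
--     # n-1-i bits of m2 (if state[i]==1), of m1 (if state[i]==2), else 0.
--     # Append rows to a pending big integer and drain full 30-bit chunks.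
--     out = []
--     pending = 0
--     plen = 0
--     for i in range(n):
--         s = states[i]
--         rowlen = n - 1 - i
--         if s == 1:
--             row = m2 & ((1 << rowlen) - 1)
--         elif s == 2:
--             row = m1 & ((1 << rowlen) - 1)
--         else:
--             row = 0
--         pending = (pending << rowlen) | row
--         plen += rowlen
--         while plen >= 30:
--             out.append(pending >> (plen - 30))
--             pending &= (1 << (plen - 30)) - 1
--             plen -= 30
--     if plen > 0 or not out:
--         out.append(pending)
--     return out
-- ===== Notes on version B (the rewrite author's own statement) =====
-- stated objective: alternative
-- what changed: Instead of A's per-pair nested loop with per-bit shift/flush bookkeeping, B builds two packed bitmasks m1/m2 of the rule states in one pass, obtains each rule's whole row of pair-bits as a single mask-and-truncate of a big integer, and drains 30-bit chunks from a pending big integer, so no Python-level work is done per pair.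
import Mathlib
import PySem

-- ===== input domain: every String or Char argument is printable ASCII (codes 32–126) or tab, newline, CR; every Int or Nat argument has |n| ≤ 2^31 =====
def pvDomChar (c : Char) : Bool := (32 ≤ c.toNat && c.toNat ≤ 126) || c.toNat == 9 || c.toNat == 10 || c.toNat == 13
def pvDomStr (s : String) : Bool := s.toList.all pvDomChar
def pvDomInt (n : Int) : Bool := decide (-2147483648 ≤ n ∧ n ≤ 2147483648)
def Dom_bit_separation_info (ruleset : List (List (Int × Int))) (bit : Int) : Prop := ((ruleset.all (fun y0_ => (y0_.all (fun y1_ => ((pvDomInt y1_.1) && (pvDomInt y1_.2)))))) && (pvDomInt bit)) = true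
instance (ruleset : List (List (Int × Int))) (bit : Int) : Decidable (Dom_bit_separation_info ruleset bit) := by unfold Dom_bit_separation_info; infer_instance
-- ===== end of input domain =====

-- B replaces A's per-pair nested loop (one Python-level step per pair) by two packed bitmasks m1/m2 of
-- the rule states: each rule's row of pair-bits is a single mask-and-truncate of a big integer, and the
-- 30-bit chunks are drained from a pending big integer (alternative algorithm, same asymptotic cost).

-- ===== PORT A =====
def pvFieldLenth : List Int := [32, 32, 16, 16, 8]

-- the dim/hash_bit guard chain; none = no branch fires (Python: UnboundLocalError, excluded by Pre_)
def pvDimA (bit : Int) : Option (Int × Int) :=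
  if 0 ≤ bit ∧ bit < 32 then some (bit, 0)
  else if 32 ≤ bit ∧ bit < 64 then some (bit - 32, 1)
  else if 64 ≤ bit ∧ bit < 80 then some (bit - 64, 2)
  else if 80 ≤ bit ∧ bit < 96 then some (bit - 80, 3)
  else if 96 ≤ bit ∧ bit < 104 then some (bit - 96, 4)
  else none

-- body of A after dim/rule_mask are fixed
def pvABody (ruleset : List (List (Int × Int))) (dim : Int) (rule_mask : Int) : List Int :=
  let rule_num : Int := ruleset.length
  let rule_state_array : List Int :=
    (PySem.List.enumerate ruleset 0).foldl (fun arr ir =>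
      let p := PySem.List.pyGetD ir.2 dim (0, 0)
      if PySem.Int.bxor p.1 p.2 ≥ rule_mask then arr
      else if PySem.Int.band p.1 rule_mask = 0 then PySem.List.pySetD arr ir.1 1
      else PySem.List.pySetD arr ir.1 2)
      (List.replicate ruleset.length (0 : Int))
  let res :=
    (PySem.List.pyRange 0 rule_num 1).foldl (fun st i =>
      (PySem.List.pyRange (i + 1) rule_num 1).foldl (fun st j =>
        let st := if st.2.2 > 29 then (st.1 ++ [st.2.1], (0 : Int), (0 : Int)) else st
        let label := st.2.1 <<< (1:Nat)
        let label := if PySem.List.pyGetD rule_state_array i 0 + PySem.List.pyGetD rule_state_array j 0 = 3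
                     then PySem.Int.bor label 1 else label
        (st.1, label, st.2.2 + 1)) st)
      (([] : List Int), (0 : Int), (0 : Int))
  res.1 ++ [res.2.1]

def bit_separation_info (ruleset : List (List (Int × Int))) (bit : Int) : List Int :=
  match pvDimA bit with
  | none => []
  | some (hash_bit, dim) =>
    pvABody ruleset dim ((1:Int) <<< (PySem.List.pyGetD pvFieldLenth dim 0 - 1 - hash_bit).toNat)

-- ===== PORT B =====
def pvDimB (bit : Int) : Option (Int × Int) :=
  if 0 ≤ bit ∧ bit < 32 then some (bit, 0)
  else if 32 ≤ bit ∧ bit < 64 then some (bit - 32, 1)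
  else if 64 ≤ bit ∧ bit < 80 then some (bit - 64, 2)
  else if 80 ≤ bit ∧ bit < 96 then some (bit - 80, 3)
  else if 96 ≤ bit ∧ bit < 104 then some (bit - 96, 4)
  else none

-- the 'while plen >= 30' drain loop of B
def pvDrain (out : List Int) (pending : Int) (plen : Int) : List Int × Int × Int :=
  if h : plen ≥ 30 then
    pvDrain (out ++ [pending >>> (plen - 30).toNat])
            (PySem.Int.band pending (((1:Int) <<< (plen - 30).toNat) - 1)) (plen - 30)
  else (out, pending, plen)
termination_by plen.toNat
decreasing_by omega

-- body of B after dim/rule_mask are fixed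
def pvBBody (ruleset : List (List (Int × Int))) (dim : Int) (rule_mask : Int) : List Int :=
  let n : Int := ruleset.length
  let smm :=
    ruleset.foldl (fun (acc : List Int × Int × Int) rule =>
      let p := PySem.List.pyGetD rule dim (0, 0)
      let s : Int := if PySem.Int.bxor p.1 p.2 ≥ rule_mask then 0
                     else if PySem.Int.band p.1 rule_mask = 0 then 1 else 2
      (acc.1 ++ [s],
       PySem.Int.bor (acc.2.1 <<< (1:Nat)) (if s = 1 then 1 else 0),
       PySem.Int.bor (acc.2.2 <<< (1:Nat)) (if s = 2 then 1 else 0)))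
      ([], 0, 0)
  let states := smm.1
  let m1 := smm.2.1
  let m2 := smm.2.2
  let fin :=
    (PySem.List.pyRange 0 n 1).foldl (fun (acc : List Int × Int × Int) i =>
      let s := PySem.List.pyGetD states i 0
      let rowlen := n - 1 - i
      let row : Int := if s = 1 then PySem.Int.band m2 (((1:Int) <<< rowlen.toNat) - 1)
                       else if s = 2 then PySem.Int.band m1 (((1:Int) <<< rowlen.toNat) - 1)
                       else 0
      pvDrain acc.1 (PySem.Int.bor (acc.2.1 <<< rowlen.toNat) row) (acc.2.2 + rowlen))
      ([], 0, 0)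
  if fin.2.2 > 0 ∨ fin.1 = [] then fin.1 ++ [fin.2.1] else fin.1

def bit_separation_info_alt (ruleset : List (List (Int × Int))) (bit : Int) : List Int :=
  match pvDimB bit with
  | none => []
  | some (hash_bit, dim) =>
    pvBBody ruleset dim ((1:Int) <<< (PySem.List.pyGetD pvFieldLenth dim 0 - 1 - hash_bit).toNat)

-- ===== PRECONDITION & SPEC =====
-- the dimension A indexes rules with, for bit in [0, 104)
def pvDimIdx (bit : Int) : Nat :=
  if bit < 32 then 0 else if bit < 64 then 1 else if bit < 80 then 2 else if bit < 96 then 3 else 4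

-- Pre_ excludes exactly the inputs where Python A raises: bit outside [0,104) (UnboundLocalError at the
-- rule_mask line) and rules too short for the selected dimension (IndexError on rule[dim]).
def Pre_bit_separation_info (ruleset : List (List (Int × Int))) (bit : Int) : Prop :=
  0 ≤ bit ∧ bit < 104 ∧ ∀ r ∈ ruleset, pvDimIdx bit < r.length
instance (ruleset : List (List (Int × Int))) (bit : Int) : Decidable (Pre_bit_separation_info ruleset bit) := by
  unfold Pre_bit_separation_info; infer_instance

def pvWitness_bit_separation_info : (List (List (Int × Int))) × Int :=
  ([[(0, 4), (0, 0)], [(5, 5), (1, 1)], [(7, 7), (2, 2)]], 29)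

def Spec_bit_separation_info (ruleset : List (List (Int × Int))) (bit : Int) (out : List Int) : Prop := out = bit_separation_info_alt ruleset bit
instance (ruleset : List (List (Int × Int))) (bit : Int) (out : List Int) : Decidable (Spec_bit_separation_info ruleset bit out) := by unfold Spec_bit_separation_info; infer_instance

-- ===== CLAIM (what is proved, stated in full; the proofs are below) =====
def Claim_equal_bit_separation_info : Prop := ∀ (ruleset : List (List (Int × Int))) (bit : Int), Dom_bit_separation_info ruleset bit → Pre_bit_separation_info ruleset bit → Spec_bit_separation_info ruleset bit (bit_separation_info ruleset bit)

-- ===== LEMMAS AND PROOFS =====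

-- MSB-first packing of a 0/1 bit list onto an accumulator
def pvPk (l : Int) (bs : List Int) : Int := bs.foldl (fun v b => 2 * v + b) l

def pvBits01 (bs : List Int) : Prop := ∀ b ∈ bs, b = 0 ∨ b = 1

-- the flat i<j pair-bit sequence over the state list
def pvFlat : List Int → List Int
  | [] => []
  | s :: rest => rest.map (fun t => if s + t = 3 then 1 else 0) ++ pvFlat rest

-- reference chunking: 30-bit chunks, last chunk partial (possibly size 30)
def pvChunks (bs : List Int) : List Int :=
  if h : bs = [] then [] else pvPk 0 (bs.take 30) :: pvChunks (bs.drop 30)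
termination_by bs.length
decreasing_by have := List.length_pos_iff.mpr h; simp; omega

-- only the full 30-bit chunks, and the (<30)-bit remainder
def pvFull (bs : List Int) : List Int :=
  if h : bs.length < 30 then [] else pvPk 0 (bs.take 30) :: pvFull (bs.drop 30)
termination_by bs.length
decreasing_by simp; omega

def pvRem (bs : List Int) : List Int :=
  if h : bs.length < 30 then bs else pvRem (bs.drop 30)
termination_by bs.length
decreasing_by simp; omega

-- A's per-bit machine step / B's per-rule state function, abstracted
def pvMStep (st : List Int × Int × Int) (b : Int) : List Int × Int × Int :=
  let st := if st.2.2 > 29 then (st.1 ++ [st.2.1], (0 : Int), (0 : Int)) else st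
  let label := st.2.1 <<< (1:Nat)
  let label := if b = 1 then PySem.Int.bor label 1 else label
  (st.1, label, st.2.2 + 1)

def pvState (dim : Int) (rule_mask : Int) (rule : List (Int × Int)) : Int :=
  let p := PySem.List.pyGetD rule dim (0, 0)
  if PySem.Int.bxor p.1 p.2 ≥ rule_mask then 0
  else if PySem.Int.band p.1 rule_mask = 0 then 1 else 2

def pvPackFrom (l c : Int) : List Int → List Int
  | [] => [l]
  | b :: bs => if c > 29 then l :: pvPackFrom b 1 bs else pvPackFrom (2 * l + b) (c + 1) bs

-- fold over the list together with its strict suffixes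
def pvRowFold {σ : Type} (h : σ → Int → List Int → σ) : σ → List Int → σ
  | st, [] => st
  | st, s :: rest => pvRowFold h (h st s rest) rest

-- ---- arithmetic lemmas ----
theorem pvNatLorAdd (a b k : Nat) (h : b < 2 ^ k) : a <<< k ||| b = a * 2 ^ k + b := by
  induction k generalizing b with
  | zero => interval_cases b <;> simp
  | succ k ih =>
    have hb2 : b / 2 < 2 ^ k := by omega
    have h1 : a <<< (k+1) = Nat.bit false (a <<< k) := by
      simp [Nat.shiftLeft_eq, Nat.bit, pow_succ]; ring
    have h2 : b = Nat.bit (b % 2 = 1) (b / 2) := by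
      by_cases hb : b % 2 = 1 <;> simp [Nat.bit, hb] <;> omega
    rw [h1]; conv_lhs => rw [h2]
    rw [Nat.lor_bit, ih _ hb2]
    by_cases hb : b % 2 = 1 <;>
      simp [Nat.bit, hb, pow_succ] <;> ring_nf <;> omega

theorem pvIntShlOr (a b : Int) (k : Nat) (ha : 0 ≤ a) (hb : 0 ≤ b) (hbk : b < 2 ^ k) :
    PySem.Int.bor (a <<< k) b = a * 2 ^ k + b := by
  rcases Int.eq_ofNat_of_zero_le ha with ⟨m, rfl⟩
  rcases Int.eq_ofNat_of_zero_le hb with ⟨n, rfl⟩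
  have hsh : (m:Int) <<< k = ((m <<< k : Nat) : Int) := by
    rw [Int.shiftLeft_eq, Nat.shiftLeft_eq]; push_cast; ring
  have hn : n < 2 ^ k := by exact_mod_cast hbk
  rw [hsh, PySem.Int.bor_natCast, pvNatLorAdd m n k hn]; push_cast; ring

theorem pvIntBandMod (a : Int) (k : Nat) (ha : 0 ≤ a) :
    PySem.Int.band a (((1:Int) <<< k) - 1) = a % 2 ^ k := by
  rcases Int.eq_ofNat_of_zero_le ha with ⟨m, rfl⟩
  have h1 : ((1:Int) <<< k) - 1 = ((2 ^ k - 1 : Nat) : Int) := by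
    rw [Int.shiftLeft_eq]; push_cast [Nat.one_le_two_pow]; ring
  rw [h1, PySem.Int.band_natCast, Nat.and_two_pow_sub_one_eq_mod]
  push_cast; ring

theorem pvIntShrDiv (a : Int) (k : Nat) (ha : 0 ≤ a) : a >>> k = a / 2 ^ k := by
  rcases Int.eq_ofNat_of_zero_le ha with ⟨m, rfl⟩
  simp [Int.shiftRight_eq_div_pow]

-- ---- pvPk lemmas ----
theorem pvPk_append (l : Int) (xs ys : List Int) : pvPk l (xs ++ ys) = pvPk (pvPk l xs) ys := by
  simp [pvPk, List.foldl_append]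

theorem pvPk_split (l : Int) (bs : List Int) : pvPk l bs = l * 2 ^ bs.length + pvPk 0 bs := by
  induction bs generalizing l with
  | nil => simp [pvPk]
  | cons b bs ih =>
    show pvPk (2*l+b) bs = _
    rw [ih (2*l+b)]
    conv_rhs => rw [show pvPk 0 (b :: bs) = pvPk (2*0+b) bs from rfl, ih (2*0+b)]
    rw [List.length_cons, pow_succ]; ring

theorem pvPk_bounds (bs : List Int) (h : pvBits01 bs) : 0 ≤ pvPk 0 bs ∧ pvPk 0 bs < 2 ^ bs.length := by
  induction bs with
  | nil => simp [pvPk]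
  | cons b bs ih =>
    have hb := h b (by simp)
    have ih' := ih (fun x hx => h x (by simp [hx]))
    rw [show pvPk 0 (b :: bs) = pvPk (2*0+b) bs from rfl, pvPk_split (2*0+b) bs, List.length_cons, pow_succ]
    constructor
    · rcases hb with rfl | rfl <;> nlinarith [ih'.1]
    · rcases hb with rfl | rfl <;> nlinarith [ih'.2, ih'.1]

theorem pvPk_take_drop (bs : List Int) (k : Nat) :
    pvPk 0 bs = pvPk 0 (bs.take k) * 2 ^ (bs.length - k) + pvPk 0 (bs.drop k) := by
  conv_lhs => rw [← List.take_append_drop k bs]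
  rw [pvPk, List.foldl_append, ← pvPk, ← pvPk, pvPk_split (pvPk 0 (bs.take k)) (bs.drop k)]
  simp [List.length_drop]

theorem pvPk_div (bs : List Int) (k : Nat) (h : pvBits01 bs) :
    pvPk 0 bs / 2 ^ (bs.length - k) = pvPk 0 (bs.take k) := by
  rw [pvPk_take_drop bs k]
  have hd := pvPk_bounds (bs.drop k) (fun x hx => h x (List.mem_of_mem_drop hx))
  rw [List.length_drop] at hd
  rw [add_comm, Int.add_mul_ediv_right _ _ (by positivity)]
  rw [Int.ediv_eq_zero_of_lt hd.1 hd.2, zero_add]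

theorem pvPk_mod (bs : List Int) (k : Nat) (h : pvBits01 bs) :
    pvPk 0 bs % 2 ^ (bs.length - k) = pvPk 0 (bs.drop k) := by
  rw [pvPk_take_drop bs k]
  have hd := pvPk_bounds (bs.drop k) (fun x hx => h x (List.mem_of_mem_drop hx))
  rw [List.length_drop] at hd
  rw [add_comm, mul_comm, Int.add_mul_emod_self_left]
  exact Int.emod_eq_of_lt hd.1 hd.2

-- ---- state / bits facts ----
theorem pvState_mem (dim mask : Int) (r : List (Int × Int)) :
    pvState dim mask r = 0 ∨ pvState dim mask r = 1 ∨ pvState dim mask r = 2 := by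
  simp only [pvState]; split_ifs <;> simp

theorem pvBits01_flat (xs : List Int) : pvBits01 (pvFlat xs) := by
  induction xs with
  | nil => intro b hb; simp [pvFlat] at hb
  | cons s rest ih =>
    intro b hb
    simp only [pvFlat, List.mem_append, List.mem_map] at hb
    rcases hb with ⟨t, _, rfl⟩ | hb
    · split <;> simp
    · exact ih b hb

theorem pvBits01_rem (bs : List Int) (h : pvBits01 bs) : pvBits01 (pvRem bs) := by
  induction bs using pvRem.induct with
  | case1 bs hlt => rw [pvRem, dif_pos hlt]; exact h
  | case2 bs hlt ih =>
    rw [pvRem, dif_neg hlt]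
    exact ih (fun x hx => h x (List.mem_of_mem_drop hx))

-- ---- A side: array build ----
def pvArrStep (dim mask : Int) (arr : List Int) (ir : Int × List (Int × Int)) : List Int :=
  let p := PySem.List.pyGetD ir.2 dim (0, 0)
  if PySem.Int.bxor p.1 p.2 ≥ mask then arr
  else if PySem.Int.band p.1 mask = 0 then PySem.List.pySetD arr ir.1 1
  else PySem.List.pySetD arr ir.1 2

theorem pvSetMid (pre : List Int) (y v : Int) (t : List Int) :
    (pre ++ y :: t).set pre.length v = pre ++ v :: t := by
  induction pre with
  | nil => rfl
  | cons a pre ih => simpa using ih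

theorem pvRsa_gen (dim mask : Int) (rs : List (List (Int × Int))) :
    ∀ (pre : List Int),
    (PySem.List.enumerate rs (pre.length : Int)).foldl (pvArrStep dim mask) (pre ++ List.replicate rs.length 0)
      = pre ++ rs.map (pvState dim mask) := by
  induction rs with
  | nil => intro pre; simp [PySem.List.enumerate]
  | cons r rs ih =>
    intro pre
    rw [PySem.List.enumerate_cons, List.foldl_cons]
    have hrep : List.replicate (r :: rs).length (0:Int) = 0 :: List.replicate rs.length 0 := rfl
    have hstep : pvArrStep dim mask (pre ++ 0 :: List.replicate rs.length 0) ((pre.length : Int), r)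
        = (pre ++ [pvState dim mask r]) ++ List.replicate rs.length 0 := by
      dsimp only [pvArrStep, pvState]
      have hset : ∀ v : Int, PySem.List.pySetD (pre ++ 0 :: List.replicate rs.length 0) ((pre.length : Int)) v
          = (pre ++ [v]) ++ List.replicate rs.length 0 := by
        intro v
        rw [PySem.List.pySetD_natCast, pvSetMid]
        simp
      split_ifs with c1 c2
      · simp
      · rw [hset]
      · rw [hset]
    have hlen : ((pre ++ [pvState dim mask r]).length : Int) = (pre.length : Int) + 1 := by
      simp
    rw [hrep, hstep, ← hlen, ih (pre ++ [pvState dim mask r])]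
    simp

theorem pvRsa_eq (ruleset : List (List (Int × Int))) (dim mask : Int) :
    (PySem.List.enumerate ruleset 0).foldl (pvArrStep dim mask) (List.replicate ruleset.length (0 : Int))
      = ruleset.map (pvState dim mask) := by
  have h := pvRsa_gen dim mask ruleset []
  simpa using h

-- ---- generic loop-shape lemmas ----
theorem pvRowFold_pyRange {σ : Type} (xs : List Int) (body : σ → Int → σ)
    (h : σ → Int → List Int → σ)
    (hb : ∀ st (i : Nat), i < xs.length → body st (i : Int) = h st (PySem.List.pyGetD xs (i : Int) 0) (xs.drop (i + 1))) :
    ∀ (a : Nat) (st : σ), (PySem.List.pyRange (a : Int) (xs.length : Int) 1).foldl body st = pvRowFold h st (xs.drop a) := by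
  intro a st
  by_cases ha : a < xs.length
  case neg =>
    rw [PySem.List.pyRange_one_eq_nil (by exact_mod_cast Nat.le_of_not_lt ha)]
    rw [List.drop_eq_nil_of_le (Nat.le_of_not_lt ha)]
    rfl
  case pos =>
    have hcons := PySem.List.pyRange_one_cons (a := (a:Int)) (b := (xs.length:Int)) (by exact_mod_cast ha)
    rw [hcons, List.foldl_cons]
    have h1 : ((a:Int) + 1) = ((a+1 : Nat) : Int) := by push_cast; ring
    rw [hb st a ha, h1]
    have hdrop : xs.drop a = xs[a] :: xs.drop (a+1) := by
      exact (List.getElem_cons_drop ha).symm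
    rw [hdrop]
    have hget : PySem.List.pyGetD xs (a : Int) 0 = xs[a] := by
      simp [PySem.List.pyGetD_natCast, List.getD_eq_getElem?_getD, ha]
    rw [hget]
    show _ = pvRowFold h (h st xs[a] (xs.drop (a+1))) (xs.drop (a+1))
    exact pvRowFold_pyRange xs body h hb (a+1) _
termination_by a => xs.length - a
decreasing_by omega

def pvHA (st : List Int × Int × Int) (s : Int) (rest : List Int) : List Int × Int × Int :=
  List.foldl pvMStep st (rest.map (fun t => if s + t = 3 then (1:Int) else 0))

theorem pvRowFoldA (xs : List Int) (st : List Int × Int × Int) :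
    pvRowFold pvHA st xs = List.foldl pvMStep st (pvFlat xs) := by
  induction xs generalizing st with
  | nil => simp [pvRowFold, pvFlat]
  | cons s rest ih => simp [pvRowFold, pvFlat, pvHA, ih, List.foldl_append]

-- ---- A side: machine ⇒ chunks ----
theorem pvMStep_arith (st : List Int × Int × Int) (b : Int) (hb : b = 0 ∨ b = 1) (hl : 0 ≤ st.2.1) :
    pvMStep st b = if st.2.2 > 29 then (st.1 ++ [st.2.1], 2 * 0 + b, (0:Int) + 1) else (st.1, 2 * st.2.1 + b, st.2.2 + 1) := by
  have key : ∀ (l : Int), 0 ≤ l → (if b = 1 then PySem.Int.bor (l <<< (1:Nat)) 1 else l <<< (1:Nat)) = 2 * l + b := by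
    intro l hl0
    rcases hb with rfl | rfl
    · simp [Int.shiftLeft_eq]; ring
    · rw [if_pos rfl, pvIntShlOr l 1 1 hl0 (by norm_num) (by norm_num)]; ring
  unfold pvMStep
  by_cases hc : st.2.2 > 29 <;> simp only [hc, if_true, if_false]
  · exact congrArg (fun x => (st.1 ++ [st.2.1], x, (0:Int)+1)) (key 0 (le_refl 0))
  · exact congrArg (fun x => (st.1, x, st.2.2+1)) (key st.2.1 hl)


theorem pvMachine_pack (bits : List Int) : ∀ (sp : List Int) (l c : Int), pvBits01 bits → 0 ≤ l →
    (List.foldl pvMStep (sp, l, c) bits).1 ++ [(List.foldl pvMStep (sp, l, c) bits).2.1]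
      = sp ++ pvPackFrom l c bits := by
  induction bits with
  | nil => intro sp l c _ _; simp [pvPackFrom]
  | cons b bs ih =>
    intro sp l c h hl
    have hb := h b (by simp)
    have h' : pvBits01 bs := fun x hx => h x (by simp [hx])
    rw [List.foldl_cons, pvMStep_arith (sp, l, c) b hb hl]
    by_cases hc : c > 29
    · simp only [hc, if_true]
      rw [ih (sp ++ [l]) (2*0+b) (0+1) h' (by rcases hb with rfl|rfl <;> norm_num)]
      rw [pvPackFrom, if_pos hc]
      have : (2*0+b) = b := by ring
      rw [this]
      simp
    · simp only [hc, if_false]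
      rw [ih sp (2*l+b) (c+1) h' (by rcases hb with rfl|rfl <;> omega)]
      rw [pvPackFrom, if_neg hc]

theorem pvPackFrom_chunks (bits : List Int) : ∀ (l c : Int), 0 ≤ c → c ≤ 30 →
    pvPackFrom l c bits = pvPk l (bits.take (30 - c).toNat) :: pvChunks (bits.drop (30 - c).toNat) := by
  induction bits with
  | nil => intro l c _ _; simp [pvPackFrom, pvPk, pvChunks]
  | cons b bs ih =>
    intro l c h0 h30
    by_cases hc : c > 29
    · have hc30 : c = 30 := by omega
      rw [pvPackFrom, if_pos hc, ih b 1 (by norm_num) (by norm_num), hc30]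
      have e1 : ((30:Int) - 1).toNat = 29 := by decide
      have e2 : ((30:Int) - 30).toNat = 0 := by decide
      rw [e1, e2, List.take_zero, List.drop_zero]
      conv_rhs => rw [pvChunks]
      rw [dif_neg (List.cons_ne_nil b bs)]
      have e3 : (b :: bs).take 30 = b :: bs.take 29 := rfl
      have e4 : (b :: bs).drop 30 = bs.drop 29 := rfl
      rw [e3, e4]
      have e5 : pvPk 0 (b :: bs.take 29) = pvPk b (bs.take 29) := by
        show pvPk (2*0+b) (bs.take 29) = _
        norm_num
      rw [e5]
      rfl
    · rw [pvPackFrom, if_neg hc, ih (2*l+b) (c+1) (by omega) (by omega)]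
      have h1 : (30 - c).toNat = (30 - (c+1)).toNat + 1 := by omega
      rw [h1]
      have h2 : (b :: bs).take ((30 - (c+1)).toNat + 1) = b :: bs.take (30 - (c+1)).toNat := rfl
      have h3 : (b :: bs).drop ((30 - (c+1)).toNat + 1) = bs.drop (30 - (c+1)).toNat := rfl
      rw [h2, h3]
      rfl

-- ---- B side ----
def pvInd (v : Int) (s : Int) : Int := if s = v then 1 else 0

theorem pvPk_cons (l b : Int) (bs : List Int) : pvPk l (b :: bs) = pvPk (2 * l + b) bs := rfl

theorem pvPk_zeros (bs : List Int) (h : ∀ b ∈ bs, b = 0) : pvPk 0 bs = 0 := by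
  induction bs with
  | nil => rfl
  | cons b bs ih =>
    have hb := h b (by simp)
    rw [pvPk_cons, hb, show (2*(0:Int)+0) = 0 by ring]
    exact ih (fun x hx => h x (by simp [hx]))

theorem pvBorBit (m b : Int) (hm : 0 ≤ m) (hb : b = 0 ∨ b = 1) :
    PySem.Int.bor (m <<< (1:Nat)) b = 2 * m + b := by
  rcases hb with rfl | rfl
  · rw [pvIntShlOr m 0 1 hm (by norm_num) (by norm_num)]; ring
  · rw [pvIntShlOr m 1 1 hm (by norm_num) (by norm_num)]; ring

def pvBStep (dim mask : Int) (acc : List Int × Int × Int) (rule : List (Int × Int)) : List Int × Int × Int :=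
  let p := PySem.List.pyGetD rule dim (0, 0)
  let s : Int := if PySem.Int.bxor p.1 p.2 ≥ mask then 0
                 else if PySem.Int.band p.1 mask = 0 then 1 else 2
  (acc.1 ++ [s],
   PySem.Int.bor (acc.2.1 <<< (1:Nat)) (if s = 1 then 1 else 0),
   PySem.Int.bor (acc.2.2 <<< (1:Nat)) (if s = 2 then 1 else 0))

theorem pvSmm_eq (dim mask : Int) (ruleset : List (List (Int × Int))) :
    ∀ (l : List Int) (m1 m2 : Int), 0 ≤ m1 → 0 ≤ m2 →
    ruleset.foldl (pvBStep dim mask) (l, m1, m2)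
    = (l ++ ruleset.map (pvState dim mask),
       pvPk m1 ((ruleset.map (pvState dim mask)).map (pvInd 1)),
       pvPk m2 ((ruleset.map (pvState dim mask)).map (pvInd 2))) := by
  induction ruleset with
  | nil => intro l m1 m2 _ _; simp [pvPk]
  | cons r rs ih =>
    intro l m1 m2 h1 h2
    have hs01 : ∀ v : Int, pvInd v (pvState dim mask r) = 0 ∨ pvInd v (pvState dim mask r) = 1 := by
      intro v; unfold pvInd; split <;> simp
    have hstep : pvBStep dim mask (l, m1, m2) r
        = (l ++ [pvState dim mask r],
           PySem.Int.bor (m1 <<< (1:Nat)) (pvInd 1 (pvState dim mask r)),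
           PySem.Int.bor (m2 <<< (1:Nat)) (pvInd 2 (pvState dim mask r))) := rfl
    rw [List.foldl_cons, hstep, pvBorBit m1 _ h1 (hs01 1), pvBorBit m2 _ h2 (hs01 2),
        ih (l ++ [pvState dim mask r]) _ _ (by have := hs01 1; omega) (by have := hs01 2; omega)]
    simp [pvPk_cons]

def pvHB (st : List Int × Int × Int) (s : Int) (rest : List Int) : List Int × Int × Int :=
  pvDrain st.1 (PySem.Int.bor (st.2.1 <<< rest.length) (pvPk 0 (rest.map (fun t => if s + t = 3 then (1:Int) else 0)))) (st.2.2 + rest.length)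

theorem pvDrain_spec (bs : List Int) (out : List Int) (h : pvBits01 bs) :
    pvDrain out (pvPk 0 bs) (bs.length : Int) = (out ++ pvFull bs, pvPk 0 (pvRem bs), ((pvRem bs).length : Int)) := by
  by_cases hlen : bs.length < 30
  · rw [pvDrain, dif_neg (show ¬ ((bs.length:Int) ≥ 30) by push_cast; omega),
        pvFull, dif_pos hlen, pvRem, dif_pos hlen]
    simp
  · have h30 : ((bs.length : Int)) ≥ 30 := by exact_mod_cast Nat.le_of_not_lt hlen
    rw [pvDrain, dif_pos h30]
    have hnn := (pvPk_bounds bs h).1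
    have e0 : ((bs.length : Int) - 30).toNat = bs.length - 30 := by omega
    have eshr : pvPk 0 bs >>> ((bs.length : Int) - 30).toNat = pvPk 0 (bs.take 30) := by
      rw [e0, pvIntShrDiv _ _ hnn, pvPk_div bs 30 h]
    have eband : PySem.Int.band (pvPk 0 bs) (((1:Int) <<< ((bs.length : Int) - 30).toNat) - 1) = pvPk 0 (bs.drop 30) := by
      rw [e0, pvIntBandMod _ _ hnn, pvPk_mod bs 30 h]
    have elen : (bs.length : Int) - 30 = ((bs.drop 30).length : Int) := by
      simp [List.length_drop]; omega
    rw [eshr, eband, elen]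
    have h' : pvBits01 (bs.drop 30) := fun x hx => h x (List.mem_of_mem_drop hx)
    rw [pvDrain_spec (bs.drop 30) (out ++ [pvPk 0 (bs.take 30)]) h']
    conv_rhs => rw [pvFull, dif_neg hlen, pvRem, dif_neg hlen]
    simp
termination_by bs.length
decreasing_by simp; omega

theorem pvFull_append (F G : List Int) :
    pvFull (F ++ G) = pvFull F ++ pvFull (pvRem F ++ G) ∧ pvRem (F ++ G) = pvRem (pvRem F ++ G) := by
  induction F using pvRem.induct with
  | case1 F hlt =>
    have h1 : pvFull F = [] := by rw [pvFull, dif_pos hlt]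
    have h2 : pvRem F = F := by rw [pvRem, dif_pos hlt]
    rw [h1, h2]
    simp
  | case2 F hlt ih =>
    have hF30 : 30 ≤ F.length := Nat.le_of_not_lt hlt
    have hlen : ¬ (F ++ G).length < 30 := by simp [List.length_append]; omega
    have htake : (F ++ G).take 30 = F.take 30 := List.take_append_of_le_length hF30
    have hdrop : (F ++ G).drop 30 = F.drop 30 ++ G := List.drop_append_of_le_length hF30
    have hfullFG : pvFull (F ++ G) = pvPk 0 (F.take 30) :: pvFull (F.drop 30 ++ G) := by
      rw [pvFull, dif_neg hlen, htake, hdrop]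
    have hremFG : pvRem (F ++ G) = pvRem (F.drop 30 ++ G) := by
      rw [pvRem, dif_neg hlen, hdrop]
    have hfullF : pvFull F = pvPk 0 (F.take 30) :: pvFull (F.drop 30) := by
      rw [pvFull, dif_neg hlt]
    have hremF : pvRem F = pvRem (F.drop 30) := by
      rw [pvRem, dif_neg hlt]
    rw [hfullFG, hremFG, hfullF, hremF, ih.1, ih.2]
    simp

theorem pvRowFoldB (xs : List Int) : ∀ (F : List Int), pvBits01 F → pvBits01 (pvFlat xs) →
    pvRowFold pvHB (pvFull F, pvPk 0 (pvRem F), ((pvRem F).length : Int)) xs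
      = (pvFull (F ++ pvFlat xs), pvPk 0 (pvRem (F ++ pvFlat xs)), ((pvRem (F ++ pvFlat xs)).length : Int)) := by
  induction xs with
  | nil => intro F _ _; simp [pvRowFold, pvFlat]
  | cons sv rest ih =>
    intro F hF hflat
    have hrow01 : pvBits01 (rest.map (fun t => if sv + t = 3 then (1:Int) else 0)) := by
      intro b hb
      simp only [List.mem_map] at hb
      rcases hb with ⟨t, _, rfl⟩
      split <;> simp
    have hflat' : pvBits01 (pvFlat rest) := by
      intro b hb; exact hflat b (by simp [pvFlat, hb])
    have hremF01 : pvBits01 (pvRem F) := pvBits01_rem F hF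
    have hcomb01 : pvBits01 (pvRem F ++ rest.map (fun t => if sv + t = 3 then (1:Int) else 0)) := by
      intro b hb
      rcases List.mem_append.mp hb with h | h
      · exact hremF01 b h
      · exact hrow01 b h
    show pvRowFold pvHB (pvHB (pvFull F, pvPk 0 (pvRem F), ((pvRem F).length : Int)) sv rest) rest = _
    have hpend : PySem.Int.bor (pvPk 0 (pvRem F) <<< rest.length)
        (pvPk 0 (rest.map (fun t => if sv + t = 3 then (1:Int) else 0)))
        = pvPk 0 (pvRem F ++ rest.map (fun t => if sv + t = 3 then (1:Int) else 0)) := by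
      have hb := pvPk_bounds (rest.map (fun t => if sv + t = 3 then (1:Int) else 0)) hrow01
      rw [List.length_map] at hb
      rw [pvIntShlOr _ _ rest.length (pvPk_bounds (pvRem F) hremF01).1 hb.1 hb.2]
      rw [pvPk_append, pvPk_split (pvPk 0 (pvRem F))]
      simp
    have hlen : ((pvRem F).length : Int) + (rest.length : Int)
        = (((pvRem F ++ rest.map (fun t => if sv + t = 3 then (1:Int) else 0)).length : Int)) := by
      simp
    have hHB : pvHB (pvFull F, pvPk 0 (pvRem F), ((pvRem F).length : Int)) sv rest
        = (pvFull (F ++ rest.map (fun t => if sv + t = 3 then (1:Int) else 0)),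
           pvPk 0 (pvRem (F ++ rest.map (fun t => if sv + t = 3 then (1:Int) else 0))),
           ((pvRem (F ++ rest.map (fun t => if sv + t = 3 then (1:Int) else 0))).length : Int)) := by
      unfold pvHB
      dsimp only
      rw [hpend, hlen, pvDrain_spec _ _ hcomb01]
      rw [(pvFull_append F _).1, (pvFull_append F _).2]
    rw [hHB, ih (F ++ rest.map (fun t => if sv + t = 3 then (1:Int) else 0))
        (by intro b hb; rcases List.mem_append.mp hb with h | h; exacts [hF b h, hrow01 b h]) hflat']
    have hassoc : F ++ rest.map (fun t => if sv + t = 3 then (1:Int) else 0) ++ pvFlat rest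
        = F ++ pvFlat (sv :: rest) := by
      simp [pvFlat]
    rw [hassoc]

theorem pvRem_nil : pvRem [] = [] := by rw [pvRem]; simp

theorem pvFull_nil : pvFull [] = [] := by rw [pvFull]; simp

theorem pvGlue (bs : List Int) :
    (if ((pvRem bs).length : Int) > 0 ∨ pvFull bs = [] then pvFull bs ++ [pvPk 0 (pvRem bs)] else pvFull bs)
      = pvPk 0 (bs.take 30) :: pvChunks (bs.drop 30) := by
  induction bs using pvRem.induct with
  | case1 bs hlt =>
    have h1 : pvFull bs = [] := by rw [pvFull, dif_pos hlt]
    have h2 : pvRem bs = bs := by rw [pvRem, dif_pos hlt]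
    have h3 : bs.take 30 = bs := List.take_of_length_le (by omega)
    have h4 : bs.drop 30 = [] := List.drop_eq_nil_of_le (by omega)
    rw [h1, h2, h3, h4, if_pos (Or.inr rfl)]
    rw [pvChunks]
    simp
  | case2 bs hlt ih =>
    have hfullF : pvFull bs = pvPk 0 (bs.take 30) :: pvFull (bs.drop 30) := by
      rw [pvFull, dif_neg hlt]
    have hremF : pvRem bs = pvRem (bs.drop 30) := by
      rw [pvRem, dif_neg hlt]
    by_cases hD : bs.drop 30 = []
    · rw [hfullF, hremF, hD, pvRem_nil, pvFull_nil]
      rw [if_neg (by simp)]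
      rw [pvChunks]
      simp
    · have hchunks : pvChunks (bs.drop 30) = pvPk 0 ((bs.drop 30).take 30) :: pvChunks ((bs.drop 30).drop 30) := by
        rw [pvChunks, dif_neg hD]
      rw [hfullF, hremF]
      by_cases hr : ((pvRem (bs.drop 30)).length : Int) > 0
      · rw [if_pos (Or.inl hr)]
        rw [if_pos (Or.inl hr)] at ih
        rw [hchunks, ← ih]
        simp
      · have hrem0 : pvRem (bs.drop 30) = [] := by
          have : (pvRem (bs.drop 30)).length = 0 := by omega
          exact List.length_eq_zero_iff.mp this
        have hD30 : ¬ (bs.drop 30).length < 30 := by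
          intro hcon
          rw [pvRem, dif_pos hcon] at hrem0
          exact hD hrem0
        have hfullD : pvFull (bs.drop 30) = pvPk 0 ((bs.drop 30).take 30) :: pvFull ((bs.drop 30).drop 30) := by
          rw [pvFull, dif_neg hD30]
        have hfne : pvFull (bs.drop 30) ≠ [] := by rw [hfullD]; exact List.cons_ne_nil _ _
        rw [if_neg (by rw [not_or]; exact ⟨hr, by simp [hfullD]⟩)]
        rw [if_neg (by rw [not_or]; exact ⟨hr, hfne⟩)] at ih
        rw [hchunks, ← ih]

-- ---- core equivalence ----
theorem pvRowFold_pyRange0 {σ : Type} (xs : List Int) (body : σ → Int → σ)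
    (h : σ → Int → List Int → σ)
    (hb : ∀ st (i : Nat), i < xs.length → body st (i : Int) = h st (PySem.List.pyGetD xs (i : Int) 0) (xs.drop (i + 1)))
    (st : σ) :
    (PySem.List.pyRange 0 (xs.length : Int) 1).foldl body st = pvRowFold h st xs := by
  simpa using pvRowFold_pyRange xs body h hb 0 st

theorem pvInd01 (v : Int) (xs : List Int) : pvBits01 (xs.map (pvInd v)) := by
  intro b hb
  simp only [List.mem_map] at hb
  rcases hb with ⟨t, _, rfl⟩
  unfold pvInd; split <;> simp

theorem pvAEq (ruleset : List (List (Int × Int))) (dim mask : Int) :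
    pvABody ruleset dim mask
      = pvPk 0 ((pvFlat (ruleset.map (pvState dim mask))).take 30)
          :: pvChunks ((pvFlat (ruleset.map (pvState dim mask))).drop 30) := by
  have harr : (PySem.List.enumerate ruleset 0).foldl (fun arr ir =>
      let p := PySem.List.pyGetD ir.2 dim (0, 0)
      if PySem.Int.bxor p.1 p.2 ≥ mask then arr
      else if PySem.Int.band p.1 mask = 0 then PySem.List.pySetD arr ir.1 1
      else PySem.List.pySetD arr ir.1 2)
      (List.replicate ruleset.length (0 : Int)) = ruleset.map (pvState dim mask) :=
    pvRsa_eq ruleset dim mask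
  unfold pvABody
  dsimp only
  rw [harr]
  have hlen : ((ruleset.length : Nat) : Int) = (((ruleset.map (pvState dim mask)).length : Nat) : Int) := by
    simp
  rw [hlen]
  have hbA : ∀ (st : List Int × Int × Int) (i : Nat), i < (ruleset.map (pvState dim mask)).length →
      (fun (st : List Int × Int × Int) (i : Int) =>
        (PySem.List.pyRange (i + 1) ((ruleset.map (pvState dim mask)).length : Int) 1).foldl (fun st j =>
          let st := if st.2.2 > 29 then (st.1 ++ [st.2.1], (0 : Int), (0 : Int)) else st
          let label := st.2.1 <<< (1:Nat)
          let label := if PySem.List.pyGetD (ruleset.map (pvState dim mask)) i 0 + PySem.List.pyGetD (ruleset.map (pvState dim mask)) j 0 = 3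
                       then PySem.Int.bor label 1 else label
          (st.1, label, st.2.2 + 1)) st) st (i : Int)
      = pvHA st (PySem.List.pyGetD (ruleset.map (pvState dim mask)) (i : Int) 0) ((ruleset.map (pvState dim mask)).drop (i + 1)) := by
    intro st i hi
    dsimp only
    rw [PySem.List.foldl_pyRange_pyGetD' (ruleset.map (pvState dim mask)) 0
        (fun acc t =>
          let acc' := if acc.2.2 > 29 then (acc.1 ++ [acc.2.1], (0 : Int), (0 : Int)) else acc
          let label := acc'.2.1 <<< (1:Nat)
          let label := if PySem.List.pyGetD (ruleset.map (pvState dim mask)) (i : Int) 0 + t = 3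
                       then PySem.Int.bor label 1 else label
          (acc'.1, label, acc'.2.2 + 1)) st (by positivity)]
    have htn : ((i : Int) + 1).toNat = i + 1 := by omega
    rw [htn]
    unfold pvHA
    rw [List.foldl_map]
    apply PySem.List.foldl_congr_mem'
    intro t _ acc
    dsimp only
    unfold pvMStep
    by_cases hc : PySem.List.pyGetD (ruleset.map (pvState dim mask)) (i : Int) 0 + t = 3 <;>
      simp [hc]
  rw [pvRowFold_pyRange0 (ruleset.map (pvState dim mask)) _ pvHA hbA (([] : List Int), (0:Int), (0:Int))]
  rw [pvRowFoldA]
  rw [pvMachine_pack (pvFlat (ruleset.map (pvState dim mask))) [] 0 0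
      (pvBits01_flat (ruleset.map (pvState dim mask))) le_rfl]
  rw [pvPackFrom_chunks (pvFlat (ruleset.map (pvState dim mask))) 0 0 le_rfl (by norm_num)]
  have : ((30:Int) - 0).toNat = 30 := by decide
  rw [this]
  simp

theorem pvPb1 (rest : List Int) :
    rest.map (fun t => if (1:Int) + t = 3 then (1:Int) else 0) = rest.map (pvInd 2) :=
  List.map_congr_left (fun t _ => by unfold pvInd; split_ifs <;> omega)

theorem pvPb2 (rest : List Int) :
    rest.map (fun t => if (2:Int) + t = 3 then (1:Int) else 0) = rest.map (pvInd 1) :=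
  List.map_congr_left (fun t _ => by unfold pvInd; split_ifs <;> omega)

theorem pvStsMem (ruleset : List (List (Int × Int))) (dim mask : Int) (t : Int)
    (ht : t ∈ ruleset.map (pvState dim mask)) : t = 0 ∨ t = 1 ∨ t = 2 := by
  rcases List.mem_map.mp ht with ⟨r, _, rfl⟩
  exact pvState_mem dim mask r

theorem pvRowVal (sts : List Int) (v : Int) (i : Nat) (hv01 : pvBits01 (sts.map (pvInd v))) (hi : i < sts.length) :
    PySem.Int.band (pvPk 0 (sts.map (pvInd v))) (((1:Int) <<< (((sts.length : Int) - 1 - (i:Int)).toNat)) - 1)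
      = pvPk 0 ((sts.drop (i+1)).map (pvInd v)) := by
  have hnn := (pvPk_bounds _ hv01).1
  rw [pvIntBandMod _ _ hnn]
  have hexp : ((sts.length : Int) - 1 - (i:Int)).toNat = (sts.map (pvInd v)).length - (i+1) := by
    simp; omega
  rw [hexp, pvPk_mod _ (i+1) hv01, List.map_drop]

theorem pvBEq (ruleset : List (List (Int × Int))) (dim mask : Int) :
    pvBBody ruleset dim mask
      = pvPk 0 ((pvFlat (ruleset.map (pvState dim mask))).take 30)
          :: pvChunks ((pvFlat (ruleset.map (pvState dim mask))).drop 30) := by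
  have hsmm : ruleset.foldl (fun (acc : List Int × Int × Int) rule =>
      let p := PySem.List.pyGetD rule dim (0, 0)
      let s : Int := if PySem.Int.bxor p.1 p.2 ≥ mask then 0
                     else if PySem.Int.band p.1 mask = 0 then 1 else 2
      (acc.1 ++ [s],
       PySem.Int.bor (acc.2.1 <<< (1:Nat)) (if s = 1 then 1 else 0),
       PySem.Int.bor (acc.2.2 <<< (1:Nat)) (if s = 2 then 1 else 0)))
      ([], 0, 0)
      = (ruleset.map (pvState dim mask),
         pvPk 0 ((ruleset.map (pvState dim mask)).map (pvInd 1)),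
         pvPk 0 ((ruleset.map (pvState dim mask)).map (pvInd 2))) := by
    have h := pvSmm_eq dim mask ruleset [] 0 0 le_rfl le_rfl
    simpa using h
  unfold pvBBody
  dsimp only
  rw [hsmm]
  dsimp only
  have hlen : ((ruleset.length : Nat) : Int) = (((ruleset.map (pvState dim mask)).length : Nat) : Int) := by
    simp
  rw [hlen]
  have hbB : ∀ (st : List Int × Int × Int) (i : Nat), i < (ruleset.map (pvState dim mask)).length →
      (fun (acc : List Int × Int × Int) (i : Int) =>
        let s := PySem.List.pyGetD (ruleset.map (pvState dim mask)) i 0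
        let rowlen := ((ruleset.map (pvState dim mask)).length : Int) - 1 - i
        let row : Int := if s = 1 then PySem.Int.band (pvPk 0 ((ruleset.map (pvState dim mask)).map (pvInd 2))) (((1:Int) <<< rowlen.toNat) - 1)
                         else if s = 2 then PySem.Int.band (pvPk 0 ((ruleset.map (pvState dim mask)).map (pvInd 1))) (((1:Int) <<< rowlen.toNat) - 1)
                         else 0
        pvDrain acc.1 (PySem.Int.bor (acc.2.1 <<< rowlen.toNat) row) (acc.2.2 + rowlen)) st (i : Int)
      = pvHB st (PySem.List.pyGetD (ruleset.map (pvState dim mask)) (i : Int) 0) ((ruleset.map (pvState dim mask)).drop (i + 1)) := by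
    intro st i hi
    dsimp only
    have hget : PySem.List.pyGetD (ruleset.map (pvState dim mask)) (i : Int) 0
        = (ruleset.map (pvState dim mask))[i] := by
      rw [PySem.List.pyGetD_natCast, List.getD_eq_getElem?_getD, List.getElem?_eq_getElem hi]
      rfl
    have hmem : (ruleset.map (pvState dim mask))[i] ∈ ruleset.map (pvState dim mask) :=
      List.getElem_mem hi
    have hrlen : (((ruleset.map (pvState dim mask)).length : Int) - 1 - (i:Int)).toNat
        = ((ruleset.map (pvState dim mask)).drop (i + 1)).length := by
      simp; omega
    have hrlenI : ((ruleset.map (pvState dim mask)).length : Int) - 1 - (i:Int)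
        = (((ruleset.map (pvState dim mask)).drop (i + 1)).length : Int) := by
      simp; omega
    unfold pvHB
    rcases pvStsMem ruleset dim mask _ hmem with h0 | h1 | h2
    · -- state 0: row = 0, and all pair bits are 0
      rw [hget, h0]
      rw [if_neg (by norm_num), if_neg (by norm_num)]
      have hz : pvPk 0 (((ruleset.map (pvState dim mask)).drop (i + 1)).map (fun t => if (0:Int) + t = 3 then (1:Int) else 0)) = 0 := by
        apply pvPk_zeros
        intro b hb
        rcases List.mem_map.mp hb with ⟨t, htm, rfl⟩
        have := pvStsMem ruleset dim mask t (List.mem_of_mem_drop htm)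
        split_ifs with hcond
        · omega
        · rfl
      rw [hz]
      conv_lhs => rw [hrlenI]
      rw [Int.toNat_natCast]
    · -- state 1: row comes from m2
      rw [hget, h1]
      rw [if_pos rfl]
      rw [pvRowVal _ 2 i (pvInd01 2 _) hi, ← pvPb1]
      conv_lhs => rw [hrlenI]
      rw [Int.toNat_natCast]
    · -- state 2: row comes from m1
      rw [hget, h2]
      rw [if_neg (by norm_num), if_pos rfl]
      rw [pvRowVal _ 1 i (pvInd01 1 _) hi, ← pvPb2]
      conv_lhs => rw [hrlenI]
      rw [Int.toNat_natCast]
  rw [pvRowFold_pyRange0 (ruleset.map (pvState dim mask)) _ pvHB hbB (([] : List Int), (0:Int), (0:Int))]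
  have hinit : ((([] : List Int), (0:Int), (0:Int)) : List Int × Int × Int)
      = (pvFull [], pvPk 0 (pvRem []), ((pvRem []).length : Int)) := by
    rw [pvFull_nil, pvRem_nil]; rfl
  rw [hinit, pvRowFoldB (ruleset.map (pvState dim mask)) []
      (by intro b hb; cases hb) (pvBits01_flat _)]
  dsimp only
  rw [show ([] : List Int) ++ pvFlat (ruleset.map (pvState dim mask)) = pvFlat (ruleset.map (pvState dim mask)) from by simp]
  exact pvGlue (pvFlat (ruleset.map (pvState dim mask)))

theorem pvCore (ruleset : List (List (Int × Int))) (dim mask : Int) :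
    pvABody ruleset dim mask = pvBBody ruleset dim mask :=
  (pvAEq ruleset dim mask).trans (pvBEq ruleset dim mask).symm

-- ===== VERDICT (by name: the statement is the Claim_ definition above) =====
theorem bit_separation_info_spec : Claim_equal_bit_separation_info := by
  intro ruleset bit _dom _pre
  unfold Spec_bit_separation_info bit_separation_info bit_separation_info_alt
  have hchain : pvDimB bit = pvDimA bit := rfl
  rw [hchain]
  cases h : pvDimA bit with
  | none => rfl
  | some p => exact pvCore ruleset p.2 _
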